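-- pv_equiv track=rewrite | github.com/gongyh/MGPGtools | utils/sequence.py | get_protein_coding_regions
-- ===== SOURCE A (Python) =====
-- def get_protein_coding_regions(dna_seq):
--     start_codons = ["ATG", "TTG", "TGT"]
--     stop_codons = ["TAA", "TAG", "TGA"]
--     protein_coding_seq = ""
--     started = False
--     for i in range(0, len(dna_seq), 3):
--         codon = dna_seq[i : i + 3]
--         if codon in start_codons:
--             started = True
--         if started:
--             protein_coding_seq += codon
--         if codon in stop_codons and started:
--             break
--     if len(protein_coding_seq) % 3 == 0:
--         return protein_coding_seq
--     else:
--         return protein_coding_seq[: len(protein_coding_seq) // 3 * 3]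
-- ===== SOURCE B (Python) =====
-- def _find_frame_codon(dna_seq, codons, positions):
--     """Return the first frame position in `positions` whose 3-char codon is in `codons`, else None."""
--     for i in positions:
--         if dna_seq[i:i + 3] in codons:
--             return i
--     return None
--
--
-- def get_protein_coding_regions(dna_seq):
--     start_codons = ["ATG", "TTG", "TGT"]
--     stop_codons = ["TAA", "TAG", "TGA"]
--     n = len(dna_seq)
--     start_pos = _find_frame_codon(dna_seq, start_codons, range(0, n, 3))
--     if start_pos is None:
--         return ""
--     stop_pos = _find_frame_codon(dna_seq, stop_codons, range(start_pos, n, 3))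
--     if stop_pos is not None:
--         return dna_seq[start_pos:stop_pos + 3]
--     return dna_seq[start_pos:start_pos + (n - start_pos) // 3 * 3]
-- ===== Notes on version B (the rewrite author's own statement) =====
-- stated objective: alternative
-- what changed: Replaces A's single flag-driven accumulation loop (building the coding string codon by codon with a started flag, then trimming mod 3) with a locate-endpoints-then-slice decomposition: find the first frame position with a start codon, then the first frame position at or after it with a stop codon, and return one slice of the input (trimmed to a multiple of 3 only when no stop exists).
import Mathlib
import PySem

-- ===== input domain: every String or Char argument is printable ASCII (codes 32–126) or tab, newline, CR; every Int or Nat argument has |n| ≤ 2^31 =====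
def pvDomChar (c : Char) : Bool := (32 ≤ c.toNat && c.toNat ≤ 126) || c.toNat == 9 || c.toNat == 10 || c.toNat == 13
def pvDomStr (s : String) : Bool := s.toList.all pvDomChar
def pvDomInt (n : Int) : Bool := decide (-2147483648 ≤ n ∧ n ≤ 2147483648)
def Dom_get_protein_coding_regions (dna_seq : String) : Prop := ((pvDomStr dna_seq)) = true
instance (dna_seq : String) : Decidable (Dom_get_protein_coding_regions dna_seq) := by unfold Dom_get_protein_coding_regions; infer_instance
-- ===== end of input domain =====

-- B replaces A's flag-driven codon-accumulation loop with a locate-endpoints-then-slice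
-- decomposition (find first start-codon frame position, then first stop-codon frame position,
-- return one slice); same results, no speed claim.


-- ===== PORT A =====
-- start_codons / stop_codons, shared module constants of both versions
def pvStartCodons : List (List Char) := [['A','T','G'], ['T','T','G'], ['T','G','T']]
def pvStopCodons : List (List Char) := [['T','A','A'], ['T','A','G'], ['T','G','A']]

-- A's for-loop over range(0, len, 3): state = (protein_coding_seq, started); break = return acc
def pvALoop (cs : List Char) (idxs : List Int) (acc : List Char) (started : Bool) : List Char :=
  match idxs with
  | [] => acc
  | i :: rest =>
    let codon := PySem.List.slice cs (some i) (some (i + 3))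
    let started := if codon ∈ pvStartCodons then true else started
    let acc := if started then acc ++ codon else acc
    if codon ∈ pvStopCodons ∧ started = true then acc
    else pvALoop cs rest acc started

def get_protein_coding_regions (dna_seq : String) : String :=
  let cs := dna_seq.toList
  let p := pvALoop cs (PySem.List.pyRange 0 (PySem.Str.len dna_seq) 3) [] false
  if PySem.Int.mod (p.length : Int) 3 = 0 then String.ofList p
  else String.ofList (PySem.List.slice p none (some (PySem.Int.floordiv (p.length : Int) 3 * 3)))

-- ===== PORT B =====
-- Source B's _find_frame_codon: first position in `idxs` whose 3-char codon is in `codons`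
def pvFindFrameCodon (cs : List Char) (codons : List (List Char)) (idxs : List Int) : Option Int :=
  match idxs with
  | [] => none
  | i :: rest =>
    if PySem.List.slice cs (some i) (some (i + 3)) ∈ codons then some i
    else pvFindFrameCodon cs codons rest

def get_protein_coding_regions_alt (dna_seq : String) : String :=
  let cs := dna_seq.toList
  let n : Int := PySem.Str.len dna_seq
  match pvFindFrameCodon cs pvStartCodons (PySem.List.pyRange 0 n 3) with
  | none => ""
  | some st =>
    match pvFindFrameCodon cs pvStopCodons (PySem.List.pyRange st n 3) with
    | some sp => String.ofList (PySem.List.slice cs (some st) (some (sp + 3)))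
    | none => String.ofList (PySem.List.slice cs (some st) (some (st + PySem.Int.floordiv (n - st) 3 * 3)))

-- ===== PRECONDITION & SPEC =====
def Spec_get_protein_coding_regions (dna_seq : String) (out : String) : Prop := out = get_protein_coding_regions_alt dna_seq
instance (dna_seq : String) (out : String) : Decidable (Spec_get_protein_coding_regions dna_seq out) := by unfold Spec_get_protein_coding_regions; infer_instance

-- ===== CLAIM (what is proved, stated in full; the proofs are below) =====
def Claim_equal_get_protein_coding_regions : Prop := ∀ (dna_seq : String), Dom_get_protein_coding_regions dna_seq → Spec_get_protein_coding_regions dna_seq (get_protein_coding_regions dna_seq)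

-- ===== LEMMAS AND PROOFS =====

-- range(a, b, 3): induction forms
lemma pyRange3_nil (a b : Int) (h : b ≤ a) : PySem.List.pyRange a b 3 = [] := by
  rw [PySem.List.pyRange_of_pos a b (by norm_num)]
  rw [if_neg (by omega)]
  simp

lemma pyRange3_cons (a b : Int) (h : a < b) :
    PySem.List.pyRange a b 3 = a :: PySem.List.pyRange (a + 3) b 3 := by
  rw [PySem.List.pyRange_of_pos a b (by norm_num),
      PySem.List.pyRange_of_pos (a + 3) b (by norm_num), if_pos h]
  have hc : ((b - a + 3 - 1) / 3).toNat
      = (if a + 3 < b then ((b - (a + 3) + 3 - 1) / 3).toNat else 0) + 1 := by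
    split_ifs with h2 <;> omega
  rw [hc, List.range_succ_eq_map, List.map_cons, List.map_map]
  refine congrArg₂ _ (by simp) ?_
  refine List.map_congr_left (fun k _ => ?_)
  simp [Function.comp, Nat.succ_eq_add_one]
  ring

-- the codon at a nonnegative frame position, as take/drop
lemma codon_eq (cs : List Char) (j : Nat) :
    PySem.List.slice cs (some (j : Int)) (some ((j : Int) + 3)) = (cs.drop j).take 3 := by
  have h := PySem.List.slice_natCast_add cs j 3
  simpa using h

-- if _find_frame_codon returns i, then i was in the list and its codon is in `codons`
lemma pvFindFrameCodon_mem {cs : List Char} {codons : List (List Char)} {L : List Int} {i : Int}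
    (h : pvFindFrameCodon cs codons L = some i) :
    i ∈ L ∧ PySem.List.slice cs (some i) (some (i + 3)) ∈ codons := by
  induction L with
  | nil => simp [pvFindFrameCodon] at h
  | cons a rest ih =>
    by_cases hc : PySem.List.slice cs (some a) (some (a + 3)) ∈ codons
    · simp [pvFindFrameCodon, hc] at h
      subst h
      exact ⟨List.mem_cons_self, hc⟩
    · simp [pvFindFrameCodon, hc] at h
      obtain ⟨h1, h2⟩ := ih h
      exact ⟨List.mem_cons_of_mem _ h1, h2⟩

-- glue: a full leading codon plus a slice starting 3 later is the longer slice
lemma glue_slice (cs : List Char) (j : Nat) {sp : Int} (hsp : ((j + 3 : Nat) : Int) ≤ sp) :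
    (cs.drop j).take 3 ++ PySem.List.slice cs (some ((j + 3 : Nat) : Int)) (some (sp + 3))
      = PySem.List.slice cs (some (j : Int)) (some (sp + 3)) := by
  have h1 : (0 : Int) ≤ sp + 3 := by omega
  rw [PySem.List.slice_toNat cs (by omega : (0:Int) ≤ ((j + 3 : Nat) : Int)) h1,
    PySem.List.slice_toNat cs (by omega : (0:Int) ≤ (j:Int)) h1]
  have e1 : ((j + 3 : Nat) : Int).toNat = j + 3 := by omega
  have e2 : (j : Int).toNat = j := by omega
  rw [e1, e2]
  have e3 : (sp + 3).toNat - j = 3 + ((sp + 3).toNat - (j + 3)) := by omega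
  rw [e3, List.take_add, List.drop_drop]

-- once `started` is true, the loop appends each codon from position j on, stopping after the
-- first stop codon: its result is acc ++ (one slice of cs)
lemma pvALoop_started (cs : List Char) :
    ∀ (d j : Nat), cs.length - j ≤ d → ∀ (acc : List Char),
    pvALoop cs (PySem.List.pyRange (j : Int) (cs.length : Int) 3) acc true
      = acc ++ (match pvFindFrameCodon cs pvStopCodons
                  (PySem.List.pyRange (j : Int) (cs.length : Int) 3) with
                | some sp => PySem.List.slice cs (some (j : Int)) (some (sp + 3))
                | none => cs.drop j) := by
  intro d
  induction d with
  | zero =>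
    intro j hj acc
    rw [pyRange3_nil _ _ (by exact_mod_cast (by omega : cs.length ≤ j))]
    simp [pvALoop, pvFindFrameCodon, List.drop_eq_nil_of_le (by omega : cs.length ≤ j)]
  | succ d ih =>
    intro j hj acc
    by_cases h : j < cs.length
    case neg =>
      rw [pyRange3_nil _ _ (by exact_mod_cast (by omega : cs.length ≤ j))]
      simp [pvALoop, pvFindFrameCodon, List.drop_eq_nil_of_le (by omega : cs.length ≤ j)]
    case pos =>
      rw [pyRange3_cons _ _ (by exact_mod_cast h)]
      simp only [pvALoop, pvFindFrameCodon, codon_eq, ite_self, if_true, and_true]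
      by_cases hstop : (cs.drop j).take 3 ∈ pvStopCodons
      · simp [hstop, codon_eq]
      · have hcast : (j : Int) + 3 = ((j + 3 : Nat) : Int) := by push_cast; ring
        simp only [hstop, if_false]
        rw [hcast, ih (j + 3) (by omega) (acc ++ (cs.drop j).take 3)]
        cases hf : pvFindFrameCodon cs pvStopCodons
            (PySem.List.pyRange ((j + 3 : Nat) : Int) (cs.length : Int) 3) with
        | none => simp [List.append_assoc]
        | some sp =>
          obtain ⟨hmem, _⟩ := pvFindFrameCodon_mem hf
          have hsp : ((j + 3 : Nat) : Int) ≤ sp :=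
            ((PySem.List.mem_pyRange_iff_of_pos (by norm_num) sp).mp hmem).1
          simp only [List.append_assoc]
          rw [glue_slice cs j hsp]

-- the full loop from position j, not yet started: nothing is kept until the first start codon,
-- after which pvALoop_started applies
lemma pvALoop_scan (cs : List Char) :
    ∀ (d j : Nat), cs.length - j ≤ d →
    pvALoop cs (PySem.List.pyRange (j : Int) (cs.length : Int) 3) [] false
      = (match pvFindFrameCodon cs pvStartCodons
             (PySem.List.pyRange (j : Int) (cs.length : Int) 3) with
         | none => []
         | some st =>
           match pvFindFrameCodon cs pvStopCodons
               (PySem.List.pyRange st (cs.length : Int) 3) with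
           | some sp => PySem.List.slice cs (some st) (some (sp + 3))
           | none => cs.drop st.toNat) := by
  intro d
  induction d with
  | zero =>
    intro j hj
    rw [pyRange3_nil _ _ (by exact_mod_cast (by omega : cs.length ≤ j))]
    simp [pvALoop, pvFindFrameCodon]
  | succ d ih =>
    intro j hj
    by_cases h : j < cs.length
    case neg =>
      rw [pyRange3_nil _ _ (by exact_mod_cast (by omega : cs.length ≤ j))]
      simp [pvALoop, pvFindFrameCodon]
    case pos =>
      by_cases hstart : PySem.List.slice cs (some (j : Int)) (some ((j : Int) + 3)) ∈ pvStartCodons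
      · -- started here: from this position on the loop behaves exactly like the started loop
        have hone : pvALoop cs (PySem.List.pyRange (j : Int) (cs.length : Int) 3) [] false
            = pvALoop cs (PySem.List.pyRange (j : Int) (cs.length : Int) 3) [] true := by
          rw [pyRange3_cons _ _ (by exact_mod_cast h)]
          simp [pvALoop, hstart]
        rw [hone, pvALoop_started cs (d + 1) j hj []]
        have hfs : pvFindFrameCodon cs pvStartCodons
            (PySem.List.pyRange (j : Int) (cs.length : Int) 3) = some (j : Int) := by
          rw [pyRange3_cons _ _ (by exact_mod_cast h)]
          simp [pvFindFrameCodon, hstart]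
        rw [hfs]
        simp [Int.toNat_natCast]
      · rw [pyRange3_cons _ _ (by exact_mod_cast h)]
        have hcast : (j : Int) + 3 = ((j + 3 : Nat) : Int) := by push_cast; ring
        simp only [pvALoop, pvFindFrameCodon, if_neg hstart, and_false, if_false,
          Bool.false_eq_true]
        rw [hcast, ih (j + 3) (by omega)]

-- the codon found by the stop search is a full codon: 3 more characters exist
lemma stop_codon_full {cs : List Char} {sp : Int} (hsp0 : 0 ≤ sp)
    (hc : PySem.List.slice cs (some sp) (some (sp + 3)) ∈ pvStopCodons) :
    sp.toNat + 3 ≤ cs.length := by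
  have hlen : (PySem.List.slice cs (some sp) (some (sp + 3))).length = 3 := by
    simp only [pvStopCodons, List.mem_cons, List.not_mem_nil, or_false] at hc
    rcases hc with h | h | h <;> rw [h] <;> rfl
  rw [PySem.List.slice_toNat cs hsp0 (by omega)] at hlen
  simp [List.length_take] at hlen
  omega

-- ===== VERDICT (by name: the statement is the Claim_ definition above) =====
theorem get_protein_coding_regions_spec : Claim_equal_get_protein_coding_regions := by
  intro s _
  unfold Spec_get_protein_coding_regions get_protein_coding_regions get_protein_coding_regions_alt
  simp only [PySem.Str.len_eq]
  set cs := s.toList with hcs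
  clear_value cs
  have h0 := pvALoop_scan cs cs.length 0 (by omega)
  simp only [Nat.cast_zero] at h0
  rw [h0]
  cases hs : pvFindFrameCodon cs pvStartCodons (PySem.List.pyRange 0 (cs.length : Int) 3) with
  | none =>
    dsimp only
    rfl
  | some st =>
    obtain ⟨hmemst, _⟩ := pvFindFrameCodon_mem hs
    have hst := (PySem.List.mem_pyRange_iff_of_pos (by norm_num) st).mp hmemst
    have hst0 : 0 ≤ st := by omega
    dsimp only
    obtain ⟨o, hp⟩ : ∃ o, pvFindFrameCodon cs pvStopCodons (PySem.List.pyRange st (cs.length : Int) 3) = o := ⟨_, rfl⟩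
    simp only [hp]
    cases o with
    | some sp =>
      dsimp only
      obtain ⟨hmemsp, hcod⟩ := pvFindFrameCodon_mem hp
      have hspr := (PySem.List.mem_pyRange_iff_of_pos (by norm_num) sp).mp hmemsp
      have hsp0 : 0 ≤ sp := by omega
      have hfull : sp.toNat + 3 ≤ cs.length := stop_codon_full hsp0 hcod
      have hlen : (PySem.List.slice cs (some st) (some (sp + 3))).length
          = (sp + 3).toNat - st.toNat := by
        rw [PySem.List.slice_toNat cs hst0 (by omega)]
        simp [List.length_take]
        omega
      have hdvd : (3 : Int) ∣ ((PySem.List.slice cs (some st) (some (sp + 3))).length : Int) := by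
        rw [hlen]
        obtain ⟨k, hk⟩ := hspr.2.2
        refine ⟨(k + 1), by omega⟩
      rw [if_pos ((PySem.Int.mod_eq_zero_iff_dvd _ _).mpr hdvd)]
    | none =>
      dsimp only
      -- A kept everything from st on and trims at the end; B takes the trimmed slice directly
      have e1 : PySem.List.slice cs (some st) (some (st + PySem.Int.floordiv ((cs.length : Int) - st) 3 * 3))
          = (cs.drop st.toNat).take ((((cs.length : Int) - st) / 3 * 3).toNat) := by
        rw [PySem.Int.floordiv_eq_ediv_of_pos (by norm_num),
          PySem.List.slice_toNat cs hst0 (by omega)]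
        congr 1
        omega
      rw [e1]
      have hL : ((cs.drop st.toNat).length : Int) = (cs.length : Int) - st := by
        simp [List.length_drop]
        omega
      by_cases hdvd : (3 : Int) ∣ ((cs.drop st.toNat).length : Int)
      · rw [if_pos ((PySem.Int.mod_eq_zero_iff_dvd _ _).mpr hdvd)]
        congr 1
        rw [List.take_of_length_le (by omega)]
      · rw [if_neg (fun hmod => hdvd ((PySem.Int.mod_eq_zero_iff_dvd _ _).mp hmod))]
        have hb : (0:Int) ≤ ((List.drop st.toNat cs).length : Int) / 3 * 3 := by omega
        rw [PySem.Int.floordiv_eq_ediv_of_pos (by norm_num), PySem.List.slice_to _ hb]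
        congr 2
        omega
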